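-- pv_equiv track=rewrite | github.com/zarusky/eve | eve-8.21.494548/eve/client/script/paperDoll/paperDoll.py | BoxIntersects
-- ===== SOURCE A (Python) =====
-- def BoxIntersects(x, y, box, uv):
--     for vert in ((x, y),
--      (x + box[0], y),
--      (x, y + box[1]),
--      (x + box[0], y + box[1])):
--         if vert[0] > uv[0] and vert[0] < uv[2] and vert[1] > uv[1] and vert[1] < uv[3]:
--             return True
--
--     return False
-- ===== SOURCE B (Python) =====
-- def BoxIntersects(x, y, box, uv):
--     x2 = x + box[0]
--     y2 = y + box[1]
--     xin = uv[0] < x < uv[2] or uv[0] < x2 < uv[2]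
--     yin = uv[1] < y < uv[3] or uv[1] < y2 < uv[3]
--     return xin and yin
-- ===== Notes on version B (the rewrite author's own statement) =====
-- stated objective: simpler
-- what changed: Replaces the 4-corner loop with a factored closed-form test: since corners are the Cartesian product {x,x+w}x{y,y+h}, 'some corner strictly inside uv' equals (x-condition) and (y-condition), each checked on the two coordinate values.
import Mathlib
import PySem

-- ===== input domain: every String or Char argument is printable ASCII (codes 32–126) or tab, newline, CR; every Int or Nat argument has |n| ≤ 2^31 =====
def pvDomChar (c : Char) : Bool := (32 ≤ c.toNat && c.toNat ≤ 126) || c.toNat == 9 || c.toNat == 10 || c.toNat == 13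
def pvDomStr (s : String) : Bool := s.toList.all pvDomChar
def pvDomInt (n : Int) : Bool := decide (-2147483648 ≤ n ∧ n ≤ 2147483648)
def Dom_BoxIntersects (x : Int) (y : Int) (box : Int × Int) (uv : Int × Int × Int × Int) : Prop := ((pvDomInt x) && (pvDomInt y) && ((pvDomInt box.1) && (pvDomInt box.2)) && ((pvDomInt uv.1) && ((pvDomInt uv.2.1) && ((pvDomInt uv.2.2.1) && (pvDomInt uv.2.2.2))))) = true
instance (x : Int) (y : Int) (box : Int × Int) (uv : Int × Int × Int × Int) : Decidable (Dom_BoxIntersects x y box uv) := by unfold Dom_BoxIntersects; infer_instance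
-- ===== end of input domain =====

-- ===== PORT A =====
-- One honest line: B factors the 4-corner loop into independent x- and y-interval tests (simpler closed form).
-- loop over the four corner vertices with early return (literal transliteration of A's for-loop)
def biLoop (verts : List (Int × Int)) (uv : Int × Int × Int × Int) : Bool :=
  match verts with
  | [] => false
  | v :: rest =>
      if v.1 > uv.1 && v.1 < uv.2.2.1 && v.2 > uv.2.1 && v.2 < uv.2.2.2 then true
      else biLoop rest uv

def BoxIntersects (x : Int) (y : Int) (box : Int × Int) (uv : Int × Int × Int × Int) : Bool :=
  biLoop [(x, y), (x + box.1, y), (x, y + box.2), (x + box.1, y + box.2)] uv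

-- ===== PORT B =====
def BoxIntersects_alt (x : Int) (y : Int) (box : Int × Int) (uv : Int × Int × Int × Int) : Bool :=
  let x2 := x + box.1
  let y2 := y + box.2
  let xin := (decide (uv.1 < x) && decide (x < uv.2.2.1)) || (decide (uv.1 < x2) && decide (x2 < uv.2.2.1))
  let yin := (decide (uv.2.1 < y) && decide (y < uv.2.2.2)) || (decide (uv.2.1 < y2) && decide (y2 < uv.2.2.2))
  xin && yin

-- ===== PRECONDITION & SPEC =====
def Spec_BoxIntersects (x : Int) (y : Int) (box : Int × Int) (uv : Int × Int × Int × Int) (out : Bool) : Prop := out = BoxIntersects_alt x y box uv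
instance (x : Int) (y : Int) (box : Int × Int) (uv : Int × Int × Int × Int) (out : Bool) : Decidable (Spec_BoxIntersects x y box uv out) := by unfold Spec_BoxIntersects; infer_instance

-- ===== CLAIM =====
def Claim_equal_BoxIntersects : Prop := ∀ (x : Int) (y : Int) (box : Int × Int) (uv : Int × Int × Int × Int), Dom_BoxIntersects x y box uv → Spec_BoxIntersects x y box uv (BoxIntersects x y box uv)

-- ===== LEMMAS AND PROOFS =====

-- ===== VERDICT =====
theorem BoxIntersects_spec : Claim_equal_BoxIntersects := by
  intro x y box uv _
  unfold Spec_BoxIntersects BoxIntersects BoxIntersects_alt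
  apply Bool.eq_iff_iff.mpr
  simp only [biLoop, Bool.ite_eq_true_distrib, Bool.and_eq_true, Bool.or_eq_true,
    decide_eq_true_eq, Bool.false_eq_true, if_true_left]
  constructor <;> intro h <;> tauto
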